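-- pv_equiv track=rewrite | github.com/adamheidrick/SDGen | main.py | calculate_modifiers
-- ===== SOURCE A (Python) =====
-- def calculate_modifiers(rolls):
--     # TODO: Is there an easier formula for calculating the mod?
--     modifiers = []
--     mod_dict = {3: -4, 5: -3, 7: -2, 9: -1, 11: 0, 13: 1, 15: 2, 17: 3}
--     for num in rolls:
--         for check in range(3, 18, 2):
--             if num <= check:
--                 modifiers.append(mod_dict[check])
--                 break
--             elif num >= 18:
--                 modifiers.append(4)
--                 break
--
--     return modifiers
-- ===== SOURCE B (Python) =====
-- def calculate_modifiers(rolls):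
--     return [max(-4, min(4, (num - 10) // 2)) for num in rolls]
-- ===== Notes on version B (the rewrite author's own statement) =====
-- stated objective: simpler
-- what changed: Replaces the per-roll scan of the range(3,18,2) table and mod_dict lookup with the clamped closed form max(-4, min(4, (num-10)//2)) in a single list comprehension.
import Mathlib
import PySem

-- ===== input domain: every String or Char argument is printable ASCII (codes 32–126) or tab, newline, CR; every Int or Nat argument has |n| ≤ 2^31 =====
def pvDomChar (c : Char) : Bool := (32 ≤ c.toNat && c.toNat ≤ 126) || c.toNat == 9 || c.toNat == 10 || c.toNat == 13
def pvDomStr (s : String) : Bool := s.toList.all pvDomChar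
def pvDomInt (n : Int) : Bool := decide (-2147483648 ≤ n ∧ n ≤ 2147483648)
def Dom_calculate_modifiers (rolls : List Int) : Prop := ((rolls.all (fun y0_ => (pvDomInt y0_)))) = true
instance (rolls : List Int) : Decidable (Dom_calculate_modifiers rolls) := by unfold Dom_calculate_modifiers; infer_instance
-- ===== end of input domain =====

-- B replaces A's table scan with the clamped closed form max(-4, min(4, (num-10)//2)); objective: simpler.

-- ===== PORT A =====
-- the literal mod_dict of A
def pvModDict : PySem.Dict Int Int :=
  PySem.Dict.ofList [(3, -4), (5, -3), (7, -2), (9, -1), (11, 0), (13, 1), (15, 2), (17, 3)]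

-- A's inner 'for check in range(3,18,2)' loop with its break; lookup mod_dict[check]
-- always hits an existing key on every reachable path, so getD's default is never used.
def pvInnerA (num : Int) : List Int → List Int → List Int
  | [], modifiers => modifiers
  | check :: rest, modifiers =>
    if num ≤ check then modifiers ++ [pvModDict.getD check 0]
    else if num ≥ 18 then modifiers ++ [4]
    else pvInnerA num rest modifiers

def calculate_modifiers (rolls : List Int) : List Int :=
  rolls.foldl (fun modifiers num => pvInnerA num (PySem.List.pyRange 3 18 2) modifiers) []

-- ===== PORT B =====
def calculate_modifiers_alt (rolls : List Int) : List Int :=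
  rolls.map (fun num => max (-4) (min 4 (PySem.Int.floordiv (num - 10) 2)))

-- ===== PRECONDITION & SPEC =====
def Spec_calculate_modifiers (rolls : List Int) (out : List Int) : Prop := out = calculate_modifiers_alt rolls
instance (rolls : List Int) (out : List Int) : Decidable (Spec_calculate_modifiers rolls out) := by unfold Spec_calculate_modifiers; infer_instance

-- ===== CLAIM (what is proved, stated in full; the proofs are below) =====
def Claim_equal_calculate_modifiers : Prop := ∀ (rolls : List Int), Dom_calculate_modifiers rolls → Spec_calculate_modifiers rolls (calculate_modifiers rolls)

-- ===== LEMMAS AND PROOFS =====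

theorem pvInner_eq (num : Int) (acc : List Int) :
    pvInnerA num (PySem.List.pyRange 3 18 2) acc
      = acc ++ [max (-4) (min 4 (PySem.Int.floordiv (num - 10) 2))] := by
  have hr : PySem.List.pyRange 3 18 2 = [3, 5, 7, 9, 11, 13, 15, 17] := by decide
  have hd : PySem.Int.floordiv (num - 10) 2 = (num - 10) / 2 :=
    PySem.Int.floordiv_eq_ediv_of_pos (by norm_num)
  have g3 : pvModDict.getD 3 0 = -4 := by decide
  have g5 : pvModDict.getD 5 0 = -3 := by decide
  have g7 : pvModDict.getD 7 0 = -2 := by decide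
  have g9 : pvModDict.getD 9 0 = -1 := by decide
  have g11 : pvModDict.getD 11 0 = 0 := by decide
  have g13 : pvModDict.getD 13 0 = 1 := by decide
  have g15 : pvModDict.getD 15 0 = 2 := by decide
  have g17 : pvModDict.getD 17 0 = 3 := by decide
  rw [hr]
  simp only [pvInnerA, hd, g3, g5, g7, g9, g11, g13, g15, g17]
  split_ifs <;> (congr 1; congr 1; omega)

theorem pvFold_eq (rolls acc : List Int) :
    rolls.foldl (fun modifiers num => pvInnerA num (PySem.List.pyRange 3 18 2) modifiers) acc
      = acc ++ rolls.map (fun num => max (-4) (min 4 (PySem.Int.floordiv (num - 10) 2))) := by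
  induction rolls generalizing acc with
  | nil => simp
  | cons x xs ih =>
    simp only [List.foldl_cons]
    rw [pvInner_eq, ih, List.map_cons, List.append_assoc]
    rfl

-- ===== VERDICT (by name: the statement is the Claim_ definition above) =====
theorem calculate_modifiers_spec : Claim_equal_calculate_modifiers := by
  intro rolls _
  show calculate_modifiers rolls = calculate_modifiers_alt rolls
  simpa [calculate_modifiers, calculate_modifiers_alt] using pvFold_eq rolls []
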